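-- pv_equiv track=rewrite | github.com/SValentina00/2019-2-level-labs | lab_4/main.py | clean_tokenize_corpus
-- ===== SOURCE A (Python) =====
-- def clean_tokenize_corpus(texts: list) -> list:
--     corpus = []
--     if not isinstance(texts, list):
--         return []
--     for text in texts:
--         if isinstance(text, str):
--             text = text.lower()
--             text = text.replace('\n', ' ')
--             text = text.replace('<br />', ' ')
--             text = text.replace('  ', ' ')
--             clear_text = ''
--             for el in text:
--                 if el.isalpha() or el == ' ':
--                     clear_text += el
--             clear_text = clear_text.split()
--             corpus.append(clear_text)
--     return corpus
-- ===== SOURCE B (Python) =====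
-- def _tokenize(text):
--     text = text.lower()
--     text = text.replace('\n', ' ')
--     text = text.replace('<br />', ' ')
--     text = text.replace('  ', ' ')
--     tokens = []
--     current = []
--     for el in text:
--         if el.isalpha():
--             current.append(el)
--         elif el == ' ':
--             if current:
--                 tokens.append(''.join(current))
--                 current = []
--     if current:
--         tokens.append(''.join(current))
--     return tokens
--
--
-- def clean_tokenize_corpus(texts: list) -> list:
--     if not isinstance(texts, list):
--         return []
--     return [_tokenize(text) for text in texts if isinstance(text, str)]
-- ===== Notes on version B (the rewrite author's own statement) =====
-- stated objective: alternative
-- what changed: Same normalisation (lowercase plus the three replaces), but tokenization is a single character pass with a current-token buffer that skips punctuation and flushes on spaces, instead of first materialising a filtered string and then calling .split(); the corpus is a comprehension instead of an accumulator loop.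
import Mathlib
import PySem

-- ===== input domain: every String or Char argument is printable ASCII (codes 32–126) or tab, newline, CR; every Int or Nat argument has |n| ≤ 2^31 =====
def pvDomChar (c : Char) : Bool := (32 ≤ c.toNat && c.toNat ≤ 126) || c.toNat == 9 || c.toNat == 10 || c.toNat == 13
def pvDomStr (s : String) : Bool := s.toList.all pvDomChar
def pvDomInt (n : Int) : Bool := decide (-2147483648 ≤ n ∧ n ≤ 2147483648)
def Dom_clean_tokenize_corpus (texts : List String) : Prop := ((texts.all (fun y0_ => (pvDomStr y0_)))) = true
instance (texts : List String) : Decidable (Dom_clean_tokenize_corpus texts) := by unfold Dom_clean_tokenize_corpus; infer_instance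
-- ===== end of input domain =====

-- B tokenizes in a single character pass with a current-token buffer instead of A's
-- filter-then-split; same normalisation. Both return the same corpus on all inputs.

-- ===== PORT A =====
-- Port of A: lowercase, three replaces, build clear_text by a char-appending loop, then split().
def clean_tokenize_corpus (texts : List String) : List (List String) :=
  texts.foldl (fun corpus text =>
    let t1 := PySem.Chars.lower text.toList
    let t2 := PySem.Chars.replace t1 "\n".toList " ".toList
    let t3 := PySem.Chars.replace t2 "<br />".toList " ".toList
    let t4 := PySem.Chars.replace t3 "  ".toList " ".toList
    let clear_text :=
      t4.foldl (fun acc el => if PySem.Chars.isalpha el || el == ' ' then acc ++ [el] else acc) []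
    corpus ++ [(PySem.Chars.split₀ clear_text).map String.ofList]) []

-- ===== PORT B =====
-- B's single-pass tokenizer: keep letters in `cur`, flush a non-empty `cur` on ' ', skip the rest.
def pvTokB : List Char → List Char → List (List Char) → List (List Char)
  | [], cur, toks => if cur.isEmpty then toks else toks ++ [cur]
  | c :: rest, cur, toks =>
    if PySem.Chars.isalpha c then pvTokB rest (cur ++ [c]) toks
    else if c == ' ' then
      if cur.isEmpty then pvTokB rest [] toks else pvTokB rest [] (toks ++ [cur])
    else pvTokB rest cur toks

def clean_tokenize_corpus_alt (texts : List String) : List (List String) :=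
  texts.map (fun text =>
    let t1 := PySem.Chars.lower text.toList
    let t2 := PySem.Chars.replace t1 "\n".toList " ".toList
    let t3 := PySem.Chars.replace t2 "<br />".toList " ".toList
    let t4 := PySem.Chars.replace t3 "  ".toList " ".toList
    (pvTokB t4 [] []).map String.ofList)

-- ===== PRECONDITION & SPEC =====
def Spec_clean_tokenize_corpus (texts : List String) (out : List (List String)) : Prop := out = clean_tokenize_corpus_alt texts
instance (texts : List String) (out : List (List String)) : Decidable (Spec_clean_tokenize_corpus texts out) := by unfold Spec_clean_tokenize_corpus; infer_instance

-- ===== CLAIM (what is proved, stated in full; the proofs are below) =====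
def Claim_equal_clean_tokenize_corpus : Prop := ∀ (texts : List String), Dom_clean_tokenize_corpus texts → Spec_clean_tokenize_corpus texts (clean_tokenize_corpus texts)

-- ===== LEMMAS AND PROOFS =====

lemma isspace_of_isalpha (c : Char) (h : PySem.Chars.isalpha c = true) :
    PySem.Chars.isspace c = false := by
  simp only [PySem.Chars.isalpha, PySem.Chars.isupper, PySem.Chars.islower, Bool.or_eq_true,
    Bool.and_eq_true, decide_eq_true_eq, Char.le_def, UInt32.le_iff_toNat_le,
    show 'A'.val.toNat = 65 from rfl, show 'Z'.val.toNat = 90 from rfl,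
    show 'a'.val.toNat = 97 from rfl, show 'z'.val.toNat = 122 from rfl] at h
  simp only [PySem.Chars.isspace, Char.toNat] at *
  simp only [Bool.or_eq_false_iff, Bool.and_eq_false_iff, decide_eq_false_iff_not]
  omega

lemma split₀_go_acc (cs : List Char) (cur : List Char) (acc : List (List Char)) :
    PySem.Chars.split₀.go cs cur acc = acc.reverse ++ PySem.Chars.split₀.go cs cur [] := by
  induction cs generalizing cur acc with
  | nil => simp [PySem.Chars.split₀.go]; split <;> simp
  | cons c rest ih =>
    simp only [PySem.Chars.split₀.go]
    split
    · split
      · exact ih [] acc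
      · rw [ih [] (cur.reverse :: acc), ih [] [cur.reverse]]; simp
    · exact ih (c :: cur) acc

lemma tokB_eq_go (cs : List Char) (cur : List Char) (toks : List (List Char)) :
    pvTokB cs cur toks =
      toks ++ PySem.Chars.split₀.go
        (cs.filter (fun el => PySem.Chars.isalpha el || el == ' ')) cur.reverse [] := by
  induction cs generalizing cur toks with
  | nil =>
    simp only [pvTokB, List.filter_nil, PySem.Chars.split₀.go]
    by_cases h : cur = [] <;> simp [h]
  | cons c rest ih =>
    simp only [pvTokB, List.filter_cons]
    by_cases ha : PySem.Chars.isalpha c = true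
    · simp only [ha, if_pos, Bool.true_or, PySem.Chars.split₀.go,
        isspace_of_isalpha c ha]
      rw [ih (cur ++ [c]) toks]
      simp
    · simp only [ha, Bool.false_or]
      by_cases hsp : c = ' '
      · subst hsp
        have : PySem.Chars.isspace ' ' = true := by decide
        simp only [BEq.rfl, if_true, PySem.Chars.split₀.go, this]
        by_cases hc : cur = []
        · subst hc; simp only [List.isEmpty_nil, if_true, List.reverse_nil]
          exact ih [] toks
        · have hne : cur.isEmpty = false := by simp [hc]
          have hne' : cur.reverse.isEmpty = false := by simp [hc]
          simp only [hne, hne', Bool.false_eq_true, if_false]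
          rw [ih [] (toks ++ [cur]), split₀_go_acc _ [] [cur.reverse.reverse]]
          simp
      · have : (c == ' ') = false := by simpa using hsp
        simp only [this, Bool.false_eq_true, if_false]
        exact ih cur toks

lemma filter_eq_foldl (cs : List Char) :
    cs.foldl (fun acc el => if PySem.Chars.isalpha el || el == ' ' then acc ++ [el] else acc) [] =
      cs.filter (fun el => PySem.Chars.isalpha el || el == ' ') := by
  rw [PySem.List.foldl_append_if]
  simp

-- ===== VERDICT (by name: the statement is the Claim_ definition above) =====
theorem clean_tokenize_corpus_spec : Claim_equal_clean_tokenize_corpus := by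
  intro texts _
  show clean_tokenize_corpus texts = clean_tokenize_corpus_alt texts
  unfold clean_tokenize_corpus clean_tokenize_corpus_alt
  rw [PySem.List.foldl_append_singleton_eq_map]
  refine List.map_congr_left (fun text _ => ?_)
  simp only [filter_eq_foldl, PySem.Chars.split₀,
    tokB_eq_go _ [] [], List.nil_append, List.reverse_nil]
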